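-- pv_equiv track=rewrite | github.com/darrenli03/freestyleRapTrainer | syllable.py | get_rhyme_key
-- ===== SOURCE A (Python) =====
-- def is_vowel(phoneme: str) -> bool:
--     return phoneme[-1] in ('0', '1', '2')
--
-- def get_rhyme_key(phones: list[str]) -> list[str] | None:
--     """
--     Returns the substring from the last *stressed* vowel to the end.
--     Falls back to the last vowel if no stressed vowel exists.
--     """
--     last_stressed = None
--     last_vowel = None
--
--     for i, p in enumerate(phones):
--         if is_vowel(p):
--             last_vowel = i
--             if p[-1] == '1':  # primary stress
--                 last_stressed = i
--
--     nucleus = last_stressed if last_stressed is not None else last_vowel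
--     if nucleus is None:
--         return None  # no vowel — skip
--
--     return phones[nucleus:]  # stressed vowel through end of word
-- ===== SOURCE B (Python) =====
-- def get_rhyme_key(phones: list[str]) -> list[str] | None:
--     """
--     Returns the substring from the last *stressed* vowel to the end.
--     Falls back to the last vowel if no stressed vowel exists.
--     Builds the two candidate suffixes directly in one forward pass: each
--     stressed vowel (resp. any vowel) restarts its accumulator, which then
--     collects every following phoneme; no indices and no slicing.
--     """
--     stressed = None
--     vowel = None
--     for p in phones:
--         c = p[-1]
--         if c == '1':
--             stressed = []
--         if c in ('0', '1', '2'):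
--             vowel = []
--         if stressed is not None:
--             stressed.append(p)
--         if vowel is not None:
--             vowel.append(p)
--     return stressed if stressed is not None else vowel
-- ===== Notes on version B (the rewrite author's own statement) =====
-- stated objective: alternative
-- what changed: B never computes or slices at an index: a single forward pass maintains the two candidate suffixes themselves as lists, restarting the stressed (resp. vowel) accumulator at each stressed vowel (resp. vowel) and appending every subsequent phoneme, so the answer is built incrementally rather than located and sliced.
-- outside the precondition, e.g. on get_rhyme_key(['K', '', 'AE1']): A raises IndexError, B raises IndexError
import Mathlib
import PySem

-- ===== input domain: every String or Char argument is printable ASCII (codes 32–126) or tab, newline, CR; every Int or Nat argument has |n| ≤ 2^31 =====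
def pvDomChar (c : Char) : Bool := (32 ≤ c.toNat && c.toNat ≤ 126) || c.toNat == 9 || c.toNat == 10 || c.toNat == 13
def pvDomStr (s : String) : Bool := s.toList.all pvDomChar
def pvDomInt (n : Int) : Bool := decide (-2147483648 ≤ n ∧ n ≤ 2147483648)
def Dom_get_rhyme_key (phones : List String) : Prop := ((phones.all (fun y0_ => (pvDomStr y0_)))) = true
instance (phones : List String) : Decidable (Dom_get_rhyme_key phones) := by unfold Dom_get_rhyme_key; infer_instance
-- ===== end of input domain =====

-- B builds the two candidate suffixes incrementally (restart-and-append accumulators)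
-- instead of A's record-last-indices-then-slice pass (objective: alternative; same cost).

-- ===== PORT A =====
-- is_vowel(phoneme): phoneme[-1] in ('0','1','2'); Str.pyGet? _ (-1) = none means Python
-- raised IndexError (excluded by Pre_), the port returns false there.
def is_vowel (phoneme : String) : Bool :=
  match PySem.Str.pyGet? phoneme (-1) with
  | some c => c == '0' || c == '1' || c == '2'
  | none => false

-- the loop body of A (state = (last_stressed, last_vowel))
def pvA_step (s : Option Int × Option Int) (ip : Int × String) : Option Int × Option Int :=
  if is_vowel ip.2 then
    if PySem.Str.pyGet? ip.2 (-1) == some '1' then (some ip.1, some ip.1)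
    else (s.1, some ip.1)
  else s

def get_rhyme_key (phones : List String) : Option (List String) :=
  let st := (PySem.List.enumerate phones 0).foldl pvA_step (none, none)
  let nucleus : Option Int := match st.1 with | some i => some i | none => st.2
  match nucleus with
  | none => none
  | some n => some (PySem.List.slice phones (some n) none)   -- phones[nucleus:]

-- ===== PORT B =====
-- the loop body of Source B (state = (stressed, vowel), each an Option list accumulator);
-- Str.pyGet? _ (-1) = none means Python raised IndexError (excluded by Pre_), the port skips.
def pvB_step (st : Option (List String) × Option (List String)) (p : String) :
    Option (List String) × Option (List String) :=
  match PySem.Str.pyGet? p (-1) with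
  | none => st
  | some c =>
      let s := if c == '1' then some ([] : List String) else st.1
      let v := if c == '0' || c == '1' || c == '2' then some ([] : List String) else st.2
      (s.map (fun l => l ++ [p]), v.map (fun l => l ++ [p]))

def get_rhyme_key_alt (phones : List String) : Option (List String) :=
  let st := phones.foldl pvB_step (none, none)
  match st.1 with
  | some s => some s
  | none => st.2

-- ===== PRECONDITION & SPEC =====
-- Pre_ excludes lists containing an empty string, on which Python A raises IndexError
-- (phoneme[-1] of '').
def Pre_get_rhyme_key (phones : List String) : Prop := ∀ p ∈ phones, p ≠ ""
instance (phones : List String) : Decidable (Pre_get_rhyme_key phones) := by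
  unfold Pre_get_rhyme_key; infer_instance

def pvWitness_get_rhyme_key : List String := ["K", "AE1", "T"]

def Spec_get_rhyme_key (phones : List String) (out : Option (List String)) : Prop := out = get_rhyme_key_alt phones
instance (phones : List String) (out : Option (List String)) : Decidable (Spec_get_rhyme_key phones out) := by unfold Spec_get_rhyme_key; infer_instance

-- ===== CLAIM (what is proved, stated in full; the proofs are below) =====
def Claim_equal_get_rhyme_key : Prop := ∀ (phones : List String), Dom_get_rhyme_key phones → Pre_get_rhyme_key phones → Spec_get_rhyme_key phones (get_rhyme_key phones)

-- ===== LEMMAS AND PROOFS =====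

-- index of the LAST element of l satisfying q
def lastIdx (q : String → Bool) : List String → Option Nat
  | [] => none
  | x :: xs =>
      match lastIdx q xs with
      | some j => some (j + 1)
      | none => if q x then some 0 else none

def stressedB (p : String) : Bool := PySem.Str.pyGet? p (-1) == some '1'

theorem lastIdx_snoc (q : String → Bool) (l : List String) (x : String) :
    lastIdx q (l ++ [x]) = if q x then some l.length else lastIdx q l := by
  induction l with
  | nil => simp [lastIdx]
  | cons y l ih =>
      simp only [List.cons_append, lastIdx, ih, List.length_cons]
      by_cases hq : q x
      · simp [hq]
      · cases hl : lastIdx q l <;> simp [hq]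

theorem lastIdx_lt_length (q : String → Bool) (l : List String) (j : Nat)
    (h : lastIdx q l = some j) : j < l.length := by
  induction l generalizing j with
  | nil => simp [lastIdx] at h
  | cons y l ih =>
      simp only [lastIdx] at h
      cases hl : lastIdx q l with
      | some k =>
          rw [hl] at h
          simp only [Option.some.injEq] at h
          have := ih k hl
          simp [← h]; omega
      | none =>
          rw [hl] at h
          by_cases hq : q y
          · simp [hq] at h; simp [← h]
          · simp [hq] at h

theorem pyGet_last_of_ne_empty (p : String) (h : p ≠ "") :
    ∃ c, PySem.Str.pyGet? p (-1) = some c := by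
  have hl : p.toList ≠ [] := by
    intro hc
    exact h (String.ext (by simp [hc]))
  have hbr : PySem.Str.pyGet? p (-1) = p.toList.getLast? := by
    simp [PySem.Str.pyGet?, PySem.List.pyGet?_neg_one]
  cases hp : p.toList with
  | nil => exact absurd hp hl
  | cons a as =>
      exact ⟨(a :: as).getLast (by simp), by rw [hbr, hp, List.getLast?_eq_some_getLast]⟩

-- characterisation of A's fold
theorem foldA (l : List String) (s : Int) (ls lv : Option Int) :
    (PySem.List.enumerate l s).foldl pvA_step (ls, lv)
      = (((lastIdx stressedB l).map (fun j => s + j)).or ls,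
         ((lastIdx is_vowel l).map (fun j => s + j)).or lv) := by
  induction l generalizing s ls lv with
  | nil => simp [lastIdx]
  | cons x xs ih =>
      rw [PySem.List.enumerate_cons, List.foldl_cons, ih]
      have hone : is_vowel x = false → (PySem.Str.pyGet? x (-1) == some '1') = false := by
        intro hy
        unfold is_vowel at hy
        cases h : PySem.Str.pyGet? x (-1) with
        | none => rfl
        | some c =>
            rw [h] at hy
            simp only [beq_eq_false_iff_ne, ne_eq, Option.some.injEq]
            intro hcc
            rw [hcc] at hy
            exact absurd hy (by decide)
      have hstep : pvA_step (ls, lv) (s, x)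
          = (if stressedB x then some s else ls, if is_vowel x then some s else lv) := by
        unfold pvA_step stressedB
        by_cases hv : is_vowel x
        · simp only [hv, if_true]
          split <;> rfl
        · have hv' : is_vowel x = false := by revert hv; cases is_vowel x <;> simp
          simp only [hv', Bool.false_eq_true, if_false, hone hv']
      rw [hstep]
      refine Prod.ext ?_ ?_ <;> simp only [lastIdx]
      · cases hs : lastIdx stressedB xs with
        | some j =>
            simp [Option.bind, Option.some_or]; omega
        | none =>
            by_cases hx : stressedB x <;> simp [hx]
      · cases hv : lastIdx is_vowel xs with
        | some j =>
            simp [Option.bind, Option.some_or]; omega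
        | none =>
            by_cases hx : is_vowel x <;> simp [hx]

-- characterisation of B's fold: the accumulators ARE the suffixes at the last indices
theorem foldB (l : List String) (h : ∀ p ∈ l, p ≠ "") :
    l.foldl pvB_step (none, none)
      = ((lastIdx stressedB l).map (fun j => l.drop j),
         (lastIdx is_vowel l).map (fun j => l.drop j)) := by
  induction l using List.reverseRecOn with
  | nil => simp [lastIdx]
  | append_singleton l x ih =>
      have hx : x ≠ "" := h x (by simp)
      obtain ⟨c, hc⟩ := pyGet_last_of_ne_empty x hx
      have hstr : stressedB x = (c == '1') := by unfold stressedB; rw [hc]; rfl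
      have hvow : is_vowel x = (c == '0' || c == '1' || c == '2') := by
        unfold is_vowel; rw [hc]
      rw [List.foldl_append, ih (fun p hp => h p (by simp [hp]))]
      simp only [List.foldl_cons, List.foldl_nil]
      unfold pvB_step
      rw [hc]
      simp only [lastIdx_snoc, hstr, hvow]
      have hdrop : ∀ q : String → Bool,
          ((lastIdx q l).map (fun j => l.drop j)).map (fun t => t ++ [x])
            = (lastIdx q l).map (fun j => (l ++ [x]).drop j) := by
        intro q
        cases hq : lastIdx q l with
        | none => rfl
        | some j =>
            have hj : j ≤ l.length := le_of_lt (lastIdx_lt_length q l j hq)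
            simp [List.drop_append_of_le_length hj]
      have hlast : (l ++ [x]).drop l.length = [x] := by
        simp [List.drop_append_of_le_length (le_refl l.length)]
      refine Prod.ext ?_ ?_ <;> simp only
      · by_cases h1 : (c == '1') = true
        · simp [h1, hlast]
        · have h1' : (c == '1') = false := by revert h1; cases (c == '1') <;> simp
          simp only [h1', Bool.false_eq_true, if_false]
          exact hdrop stressedB
      · by_cases h1 : (c == '0' || c == '1' || c == '2') = true
        · simp [h1, hlast]
        · have h1' : (c == '0' || c == '1' || c == '2') = false := by
            revert h1; cases (c == '0' || c == '1' || c == '2') <;> simp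
          simp only [h1', Bool.false_eq_true, if_false]
          exact hdrop is_vowel

-- ===== VERDICT (by name: the statement is the Claim_ definition above) =====
theorem get_rhyme_key_spec : Claim_equal_get_rhyme_key := by
  intro phones _ hpre
  unfold Spec_get_rhyme_key get_rhyme_key get_rhyme_key_alt
  rw [foldA, foldB phones hpre]
  simp only [Option.or_none]
  cases hs : lastIdx stressedB phones with
  | some j =>
      simp [Option.map, Option.bind, PySem.List.slice_from_natCast]
  | none =>
      simp only [Option.map_none]
      cases hv : lastIdx is_vowel phones with
      | none => rfl
      | some j =>
          simp [Option.map, Option.bind, PySem.List.slice_from_natCast]
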